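-- pv_equiv track=rewrite | github.com/sparesparrow/NucleusESP32 | peugeot.py | decode_manchester
-- ===== SOURCE A (Python) =====
-- def decode_manchester(bitstream_string):
--     """Performs Manchester decoding on the raw bitstream.
--     A common convention: '01' = 1, '10' = 0.
--     """
--     decoded_bits = []
--     i = 0
--     while i < len(bitstream_string) - 1:
--         pair = bitstream_string[i:i+2]
--         if pair == '01':
--             decoded_bits.append('1')
--         elif pair == '10':
--             decoded_bits.append('0')
--         else:
--             # Skip non-standard transitions (e.g., '00' or '11')
--             pass
--         i += 2
--
--     return "".join(decoded_bits)
-- ===== SOURCE B (Python) =====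
-- def decode_manchester(bitstream_string):
--     """Manchester decode as a streaming one-character automaton.
--
--     Holds the pending first half-bit; a pair is valid exactly when its two
--     characters are distinct bits, and the decoded bit then equals the SECOND
--     character ('01' -> '1', '10' -> '0'), so the automaton emits it directly
--     instead of branching per pattern.
--     """
--     out = []
--     pending = None
--     for c in bitstream_string:
--         if pending is None:
--             pending = c
--         else:
--             if pending != c and pending in '01' and c in '01':
--                 out.append(c)
--             pending = None
--     return "".join(out)
-- ===== Notes on version B (the rewrite author's own statement) =====
-- stated objective: alternative
-- what changed: Replaces A's index-stepped two-character-slice loop with pattern branches by a streaming one-character automaton that keeps a pending half-bit and emits the pair's second character directly, using the fact that a valid pair is exactly two distinct bits and decodes to its second character.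
import Mathlib
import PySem

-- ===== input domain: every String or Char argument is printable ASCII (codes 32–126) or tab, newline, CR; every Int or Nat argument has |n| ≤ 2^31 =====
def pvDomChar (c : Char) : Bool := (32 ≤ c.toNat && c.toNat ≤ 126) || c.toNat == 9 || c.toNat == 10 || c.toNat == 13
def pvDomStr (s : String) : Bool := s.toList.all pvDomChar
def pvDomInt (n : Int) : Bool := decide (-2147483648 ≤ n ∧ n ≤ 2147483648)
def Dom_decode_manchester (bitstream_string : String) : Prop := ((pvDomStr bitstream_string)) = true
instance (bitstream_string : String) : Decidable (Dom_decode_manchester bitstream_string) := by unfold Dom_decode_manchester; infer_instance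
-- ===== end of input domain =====

-- B replaces A's two-character-slice pair loop by a streaming one-character automaton
-- with a pending half-bit that emits each valid pair's second character (alternative decomposition).

-- ===== PORT A =====
-- A's loop: pair = s[i:i+2], branch on '01'/'10', i += 2; stops when fewer than 2 chars remain.
def pvALoop : List Char → List Char
  | a :: b :: rest =>
      (if a = '0' ∧ b = '1' then ['1']
       else if a = '1' ∧ b = '0' then ['0']
       else []) ++ pvALoop rest
  | _ => []

def decode_manchester (bitstream_string : String) : String :=
  String.ofList (pvALoop bitstream_string.toList)

-- ===== PORT B =====
-- one automaton step: state = (output so far, pending first half-bit)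
def pvBStep (st : List Char × Option Char) (c : Char) : List Char × Option Char :=
  match st.2 with
  | none => (st.1, some c)
  | some p =>
      (if p ≠ c ∧ (p = '0' ∨ p = '1') ∧ (c = '0' ∨ c = '1') then st.1 ++ [c] else st.1, none)

def decode_manchester_alt (bitstream_string : String) : String :=
  String.ofList ((bitstream_string.toList.foldl pvBStep ([], none)).1)

-- ===== PRECONDITION & SPEC =====
def Spec_decode_manchester (bitstream_string : String) (out : String) : Prop := out = decode_manchester_alt bitstream_string
instance (bitstream_string : String) (out : String) : Decidable (Spec_decode_manchester bitstream_string out) := by unfold Spec_decode_manchester; infer_instance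

-- ===== CLAIM (what is proved, stated in full; the proofs are below) =====
def Claim_equal_decode_manchester : Prop := ∀ (bitstream_string : String), Dom_decode_manchester bitstream_string → Spec_decode_manchester bitstream_string (decode_manchester bitstream_string)

-- ===== LEMMAS AND PROOFS =====
theorem foldl_pvBStep_eq (l : List Char) : ∀ acc : List Char,
    (List.foldl pvBStep (acc, none) l).1 = acc ++ pvALoop l := by
  induction l using pvALoop.induct with
  | case1 a b rest ih =>
      intro acc
      simp only [List.foldl_cons, pvBStep, pvALoop]
      rw [show (List.foldl pvBStep
            ((if a ≠ b ∧ (a = '0' ∨ a = '1') ∧ (b = '0' ∨ b = '1') then acc ++ [b] else acc), none) rest).1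
          = (if a ≠ b ∧ (a = '0' ∨ a = '1') ∧ (b = '0' ∨ b = '1') then acc ++ [b] else acc)
            ++ pvALoop rest from ih _]
      split_ifs with h1 h2 h3 <;> (try rfl) <;> (try simp_all) <;>
        (obtain ⟨hne, ha, hb⟩ := h1; rcases ha with ha | ha <;> rcases hb with hb | hb <;> simp_all)
  | case2 l h =>
      intro acc
      cases l with
      | nil => simp [pvALoop]
      | cons a t =>
        cases t with
        | nil => simp [pvALoop, pvBStep]
        | cons b r => exact absurd rfl (h a b r)

-- ===== VERDICT (by name: the statement is the Claim_ definition above) =====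
theorem decode_manchester_spec : Claim_equal_decode_manchester := by
  intro s _
  unfold Spec_decode_manchester decode_manchester decode_manchester_alt
  rw [foldl_pvBStep_eq _ []]
  rfl
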